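-- pv_equiv track=rewrite | github.com/subhande/Algoexpert | dynamic_programming/14_maximize_expression.py | maximizeExpression
-- ===== SOURCE A (Python) =====
-- def maximizeExpression(array):
--     if len(array) < 4:
--         return 0
--     maxExpValue = float("-inf")
--     for i in range(len(array)):
--         for j in range(i + 1, len(array)):
--             for k in range(j + 1, len(array)):
--                 for l in range(k + 1, len(array)):
--                     maxExpValue = max(maxExpValue, evaluate(array[i], array[j], array[k], array[l]))
--     return maxExpValue
--
-- def evaluate(a, b, c, d):
--     return a - b + c - d
-- ===== SOURCE B (Python) =====
-- def maximizeExpression(array):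
--     if len(array) < 4:
--         return 0
--     maxA = float("-inf")
--     maxAB = float("-inf")
--     maxABC = float("-inf")
--     maxABCD = float("-inf")
--     for x in array:
--         maxABCD = max(maxABCD, maxABC - x)
--         maxABC = max(maxABC, maxAB + x)
--         maxAB = max(maxAB, maxA - x)
--         maxA = max(maxA, x)
--     return maxABCD
-- ===== Notes on version B (the rewrite author's own statement) =====
-- stated objective: faster
-- what changed: Replaced the quadruple nested loop over all index quadruples i<j<k<l by a single left-to-right pass maintaining four running maxima (best a, best a-b, best a-b+c, best a-b+c-d over the prefix).
import Mathlib
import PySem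

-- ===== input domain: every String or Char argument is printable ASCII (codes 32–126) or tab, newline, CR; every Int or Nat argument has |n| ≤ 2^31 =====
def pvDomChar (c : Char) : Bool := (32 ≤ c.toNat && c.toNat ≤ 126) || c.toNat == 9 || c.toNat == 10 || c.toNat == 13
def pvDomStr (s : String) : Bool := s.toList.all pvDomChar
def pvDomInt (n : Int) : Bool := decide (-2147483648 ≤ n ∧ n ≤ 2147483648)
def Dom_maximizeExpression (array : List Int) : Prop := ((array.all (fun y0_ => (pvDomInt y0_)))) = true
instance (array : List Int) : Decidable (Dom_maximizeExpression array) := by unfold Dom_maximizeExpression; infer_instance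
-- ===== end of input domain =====

-- B replaces A's O(n^4) scan of all index quadruples by one O(n) pass with four running maxima.

-- Python's max where one side may be float('-inf'): none plays -inf.
def pvOmax (a b : Option Int) : Option Int :=
  match a, b with
  | none, b => b
  | some v, none => some v
  | some v, some w => some (max v w)

-- ===== PORT A =====
def pvEvaluate (a b c d : Int) : Int := a - b + c - d

def pvLoopA (array : List Int) : Option Int :=
  (PySem.List.pyRange 0 (array.length : Int) 1).foldl (fun acc i =>
    (PySem.List.pyRange (i + 1) (array.length : Int) 1).foldl (fun acc j =>
      (PySem.List.pyRange (j + 1) (array.length : Int) 1).foldl (fun acc k =>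
        (PySem.List.pyRange (k + 1) (array.length : Int) 1).foldl (fun acc l =>
          pvOmax acc (some (pvEvaluate (PySem.List.pyGetD array i 0) (PySem.List.pyGetD array j 0)
            (PySem.List.pyGetD array k 0) (PySem.List.pyGetD array l 0)))) acc) acc) acc) none

def maximizeExpression (array : List Int) : Int :=
  if array.length < 4 then 0 else (pvLoopA array).getD 0

-- ===== PORT B =====
-- state = (maxA, maxAB, maxABC, maxABCD); all updates read the pre-iteration values.
def pvStep (s : Option Int × Option Int × Option Int × Option Int) (x : Int) :
    Option Int × Option Int × Option Int × Option Int :=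
  (pvOmax s.1 (some x),
   pvOmax s.2.1 (s.1.map (fun v => v - x)),
   pvOmax s.2.2.1 (s.2.1.map (fun v => v + x)),
   pvOmax s.2.2.2 (s.2.2.1.map (fun v => v - x)))

def maximizeExpression_alt (array : List Int) : Int :=
  if array.length < 4 then 0
  else ((array.foldl pvStep (none, none, none, none)).2.2.2).getD 0

-- ===== PRECONDITION & SPEC =====
def Spec_maximizeExpression (array : List Int) (out : Int) : Prop := out = maximizeExpression_alt array
instance (array : List Int) (out : Int) : Decidable (Spec_maximizeExpression array out) := by unfold Spec_maximizeExpression; infer_instance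

-- ===== CLAIM (what is proved, stated in full; the proofs are below) =====
def Claim_equal_maximizeExpression : Prop := ∀ (array : List Int), Dom_maximizeExpression array → Spec_maximizeExpression array (maximizeExpression array)

-- ===== LEMMAS AND PROOFS =====

def pvBig (l : List (Option Int)) : Option Int := l.foldl pvOmax none
def pvShift (c : Int) (o : Option Int) : Option Int := o.map (fun v => c + v)

theorem pvOmax_none_left (b : Option Int) : pvOmax none b = b := rfl
theorem pvOmax_none_right (a : Option Int) : pvOmax a none = a := by cases a <;> rfl
theorem pvOmax_assoc (a b c : Option Int) : pvOmax (pvOmax a b) c = pvOmax a (pvOmax b c) := by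
  cases a <;> cases b <;> cases c <;> simp [pvOmax, max_assoc]
theorem pvShift_omax (c : Int) (a b : Option Int) :
    pvShift c (pvOmax a b) = pvOmax (pvShift c a) (pvShift c b) := by
  cases a <;> cases b <;> simp [pvOmax, pvShift] <;> omega
theorem pvShift_add (c d : Int) (o : Option Int) :
    pvShift (c + d) o = pvShift c (pvShift d o) := by
  cases o <;> simp [pvShift] <;> ring
theorem pvShift_sub (c d : Int) (o : Option Int) :
    pvShift (c - d) o = pvShift c (pvShift (-d) o) := by
  cases o <;> simp [pvShift] <;> ring
theorem pvShift_comm (c d : Int) (o : Option Int) :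
    pvShift c (pvShift d o) = pvShift d (pvShift c o) := by
  cases o <;> simp [pvShift] <;> ring
theorem pvShift_none (c : Int) : pvShift c none = none := rfl

theorem foldl_pvOmax_acc (l : List (Option Int)) : ∀ acc, l.foldl pvOmax acc = pvOmax acc (pvBig l) := by
  induction l with
  | nil => intro acc; simp [pvBig, pvOmax_none_right]
  | cons x l ih =>
      intro acc
      have hbig : pvBig (x :: l) = pvOmax x (pvBig l) := by
        simp only [pvBig, List.foldl_cons, pvOmax_none_left]
        exact ih x
      rw [hbig, List.foldl_cons, ih (pvOmax acc x), pvOmax_assoc]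

theorem pvBig_cons (x : Option Int) (l : List (Option Int)) : pvBig (x :: l) = pvOmax x (pvBig l) := by
  simp only [pvBig, List.foldl_cons, pvOmax_none_left]
  exact foldl_pvOmax_acc l x

theorem pvBig_singleton (x : Option Int) : pvBig [x] = x := by
  rw [pvBig_cons]; exact pvOmax_none_right x

theorem pvBig_append (l₁ l₂ : List (Option Int)) : pvBig (l₁ ++ l₂) = pvOmax (pvBig l₁) (pvBig l₂) := by
  simp only [pvBig, List.foldl_append]
  exact foldl_pvOmax_acc l₂ (l₁.foldl pvOmax none)

theorem foldl_pvOmax_map {α : Type} (L : List α) (F : α → Option Int) (acc : Option Int) :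
    L.foldl (fun acc t => pvOmax acc (F t)) acc = pvOmax acc (pvBig (L.map F)) := by
  rw [← List.foldl_map, foldl_pvOmax_acc]

theorem pvBig_map_shift {α : Type} (L : List α) (c : Int) (F : α → Option Int) :
    pvBig (L.map (fun t => pvShift c (F t))) = pvShift c (pvBig (L.map F)) := by
  induction L with
  | nil => rfl
  | cons x l ih => simp only [List.map_cons, pvBig_cons, ih, pvShift_omax]

theorem pvBig_map_omax {α : Type} (L : List α) (F G : α → Option Int) :
    pvBig (L.map (fun t => pvOmax (F t) (G t))) = pvOmax (pvBig (L.map F)) (pvBig (L.map G)) := by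
  induction L with
  | nil => rfl
  | cons x l ih =>
      simp only [List.map_cons, pvBig_cons, ih]
      cases F x <;> cases G x <;> cases pvBig (l.map F) <;> cases pvBig (l.map G) <;>
        simp [pvOmax] <;> omega

-- the nested-max family over suffix index ranges (g i = array[i])
def famN (xs : List Int) (a : Int) : Option Int :=
  pvBig ((PySem.List.pyRange a (xs.length : Int) 1).map (fun l => some (-(PySem.List.pyGetD xs l 0))))
def famM1 (xs : List Int) (a : Int) : Option Int :=
  pvBig ((PySem.List.pyRange a (xs.length : Int) 1).map (fun k => some (PySem.List.pyGetD xs k 0)))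
def famP (xs : List Int) (a : Int) : Option Int :=
  pvBig ((PySem.List.pyRange a (xs.length : Int) 1).map (fun k => pvShift (PySem.List.pyGetD xs k 0) (famN xs (k + 1))))
def famM2 (xs : List Int) (a : Int) : Option Int :=
  pvBig ((PySem.List.pyRange a (xs.length : Int) 1).map (fun j => pvShift (-(PySem.List.pyGetD xs j 0)) (famM1 xs (j + 1))))
def famQ (xs : List Int) (a : Int) : Option Int :=
  pvBig ((PySem.List.pyRange a (xs.length : Int) 1).map (fun j => pvShift (-(PySem.List.pyGetD xs j 0)) (famP xs (j + 1))))
def famM3 (xs : List Int) (a : Int) : Option Int :=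
  pvBig ((PySem.List.pyRange a (xs.length : Int) 1).map (fun i => pvShift (PySem.List.pyGetD xs i 0) (famM2 xs (i + 1))))
def famR (xs : List Int) (a : Int) : Option Int :=
  pvBig ((PySem.List.pyRange a (xs.length : Int) 1).map (fun i => pvShift (PySem.List.pyGetD xs i 0) (famQ xs (i + 1))))

-- collapse of A's nested folds, level by level
theorem lvl4 (xs : List Int) (c a : Int) (acc : Option Int) :
    (PySem.List.pyRange a (xs.length : Int) 1).foldl
      (fun acc l => pvOmax acc (some (c - PySem.List.pyGetD xs l 0))) acc
      = pvOmax acc (pvShift c (famN xs a)) := by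
  rw [foldl_pvOmax_map]
  congr 1
  have h : ∀ l : Int, some (c - PySem.List.pyGetD xs l 0)
      = pvShift c (some (-(PySem.List.pyGetD xs l 0))) := by
    intro l; simp [pvShift]; ring
  calc pvBig ((PySem.List.pyRange a (xs.length : Int) 1).map (fun l => some (c - PySem.List.pyGetD xs l 0)))
      = pvBig ((PySem.List.pyRange a (xs.length : Int) 1).map (fun l => pvShift c (some (-(PySem.List.pyGetD xs l 0))))) := by
        exact congrArg pvBig (List.map_congr_left (fun l _ => h l))
    _ = pvShift c (famN xs a) := by rw [pvBig_map_shift]; rfl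

theorem lvl3 (xs : List Int) (c a : Int) (acc : Option Int) :
    (PySem.List.pyRange a (xs.length : Int) 1).foldl
      (fun acc k => pvOmax acc (pvShift (c + PySem.List.pyGetD xs k 0) (famN xs (k + 1)))) acc
      = pvOmax acc (pvShift c (famP xs a)) := by
  rw [foldl_pvOmax_map]
  congr 1
  calc pvBig ((PySem.List.pyRange a (xs.length : Int) 1).map (fun k => pvShift (c + PySem.List.pyGetD xs k 0) (famN xs (k + 1))))
      = pvBig ((PySem.List.pyRange a (xs.length : Int) 1).map (fun k => pvShift c (pvShift (PySem.List.pyGetD xs k 0) (famN xs (k + 1))))) := by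
        exact congrArg pvBig (List.map_congr_left (fun k _ => pvShift_add c _ _))
    _ = pvShift c (famP xs a) := by rw [pvBig_map_shift]; rfl

theorem lvl2 (xs : List Int) (c a : Int) (acc : Option Int) :
    (PySem.List.pyRange a (xs.length : Int) 1).foldl
      (fun acc j => pvOmax acc (pvShift (c - PySem.List.pyGetD xs j 0) (famP xs (j + 1)))) acc
      = pvOmax acc (pvShift c (famQ xs a)) := by
  rw [foldl_pvOmax_map]
  congr 1
  calc pvBig ((PySem.List.pyRange a (xs.length : Int) 1).map (fun j => pvShift (c - PySem.List.pyGetD xs j 0) (famP xs (j + 1))))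
      = pvBig ((PySem.List.pyRange a (xs.length : Int) 1).map (fun j => pvShift c (pvShift (-(PySem.List.pyGetD xs j 0)) (famP xs (j + 1))))) := by
        exact congrArg pvBig (List.map_congr_left (fun j _ => pvShift_sub c _ _))
    _ = pvShift c (famQ xs a) := by rw [pvBig_map_shift]; rfl

theorem loopA_eq (xs : List Int) : pvLoopA xs = famR xs 0 := by
  unfold pvLoopA
  simp only [pvEvaluate]
  simp only [lvl4, lvl3, lvl2]
  rw [foldl_pvOmax_map, pvOmax_none_left]
  rfl

-- index stability under snoc
theorem getD_append_lt (xs : List Int) (x : Int) (l : Int) (h0 : 0 ≤ l) (h : l < (xs.length : Int)) :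
    PySem.List.pyGetD (xs ++ [x]) l 0 = PySem.List.pyGetD xs l 0 := by
  have h' : l < ((xs ++ [x]).length : Int) := by simp; omega
  rw [PySem.List.pyGetD_eq_getElem (xs ++ [x]) 0 h0 h', PySem.List.pyGetD_eq_getElem xs 0 h0 h]
  have hl : l.toNat < xs.length := by omega
  exact List.getElem_append_left (bs := [x]) hl

theorem getD_append_last (xs : List Int) (x : Int) :
    PySem.List.pyGetD (xs ++ [x]) (xs.length : Int) 0 = x := by
  have h0 : (0 : Int) ≤ (xs.length : Int) := by positivity
  have h' : (xs.length : Int) < ((xs ++ [x]).length : Int) := by simp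
  rw [PySem.List.pyGetD_eq_getElem (xs ++ [x]) 0 h0 h']
  simp

theorem len_snoc (xs : List Int) (x : Int) : ((xs ++ [x]).length : Int) = (xs.length : Int) + 1 := by
  simp

theorem pvBig_map_range_succ (a n : Int) (h : a ≤ n) (E : Int → Option Int) :
    pvBig ((PySem.List.pyRange a (n + 1) 1).map E)
      = pvOmax (pvBig ((PySem.List.pyRange a n 1).map E)) (E n) := by
  rw [PySem.List.pyRange_one_succ_right h, List.map_append]
  simp [pvBig_append, pvBig_singleton]

-- the seven snoc recurrences
theorem famN_snoc (xs : List Int) (x a : Int) (h0 : 0 ≤ a) (ha : a ≤ (xs.length : Int)) :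
    famN (xs ++ [x]) a = pvOmax (famN xs a) (some (-x)) := by
  unfold famN
  rw [len_snoc, pvBig_map_range_succ a _ ha, getD_append_last]
  congr 1
  refine congrArg pvBig (List.map_congr_left ?_)
  intro l hl
  rw [PySem.List.mem_pyRange_one] at hl
  rw [getD_append_lt xs x l (by omega) hl.2]

theorem famM1_snoc (xs : List Int) (x a : Int) (h0 : 0 ≤ a) (ha : a ≤ (xs.length : Int)) :
    famM1 (xs ++ [x]) a = pvOmax (famM1 xs a) (some x) := by
  unfold famM1
  rw [len_snoc, pvBig_map_range_succ a _ ha, getD_append_last]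
  congr 1
  refine congrArg pvBig (List.map_congr_left ?_)
  intro l hl
  rw [PySem.List.mem_pyRange_one] at hl
  rw [getD_append_lt xs x l (by omega) hl.2]

theorem famN_nil_top (xs : List Int) (x : Int) : famN (xs ++ [x]) ((xs.length : Int) + 1) = none := by
  unfold famN
  rw [len_snoc, PySem.List.pyRange_one_eq_nil (le_refl _)]
  rfl

theorem famM1_nil_top (xs : List Int) (x : Int) : famM1 (xs ++ [x]) ((xs.length : Int) + 1) = none := by
  unfold famM1
  rw [len_snoc, PySem.List.pyRange_one_eq_nil (le_refl _)]
  rfl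

theorem famP_snoc (xs : List Int) (x a : Int) (h0 : 0 ≤ a) (ha : a ≤ (xs.length : Int)) :
    famP (xs ++ [x]) a = pvOmax (famP xs a) (pvShift (-x) (famM1 xs a)) := by
  unfold famP
  rw [len_snoc, pvBig_map_range_succ a _ ha, getD_append_last, famN_nil_top, pvShift_none,
    pvOmax_none_right]
  have hold : ∀ k ∈ PySem.List.pyRange a (xs.length : Int) 1,
      pvShift (PySem.List.pyGetD (xs ++ [x]) k 0) (famN (xs ++ [x]) (k + 1))
        = pvOmax (pvShift (PySem.List.pyGetD xs k 0) (famN xs (k + 1)))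
                 (pvShift (-x) (some (PySem.List.pyGetD xs k 0) : Option Int)) := by
    intro k hk
    rw [PySem.List.mem_pyRange_one] at hk
    rw [getD_append_lt xs x k (by omega) hk.2,
      famN_snoc xs x (k + 1) (by omega) (by omega), pvShift_omax]
    congr 1
    simp [pvShift]
    ring
  rw [List.map_congr_left hold, pvBig_map_omax]
  congr 1
  exact pvBig_map_shift (PySem.List.pyRange a (xs.length : Int) 1) (-x)
      (fun k => some (PySem.List.pyGetD xs k 0))

theorem famM2_snoc (xs : List Int) (x a : Int) (h0 : 0 ≤ a) (ha : a ≤ (xs.length : Int)) :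
    famM2 (xs ++ [x]) a = pvOmax (famM2 xs a) (pvShift x (famN xs a)) := by
  unfold famM2
  rw [len_snoc, pvBig_map_range_succ a _ ha, getD_append_last, famM1_nil_top, pvShift_none,
    pvOmax_none_right]
  have hold : ∀ j ∈ PySem.List.pyRange a (xs.length : Int) 1,
      pvShift (-(PySem.List.pyGetD (xs ++ [x]) j 0)) (famM1 (xs ++ [x]) (j + 1))
        = pvOmax (pvShift (-(PySem.List.pyGetD xs j 0)) (famM1 xs (j + 1)))
                 (pvShift x (some (-(PySem.List.pyGetD xs j 0)) : Option Int)) := by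
    intro j hj
    rw [PySem.List.mem_pyRange_one] at hj
    rw [getD_append_lt xs x j (by omega) hj.2,
      famM1_snoc xs x (j + 1) (by omega) (by omega), pvShift_omax]
    congr 1
    simp [pvShift]
    ring
  rw [List.map_congr_left hold, pvBig_map_omax]
  congr 1
  exact pvBig_map_shift (PySem.List.pyRange a (xs.length : Int) 1) x
      (fun j => some (-(PySem.List.pyGetD xs j 0)))

theorem famP_nil_top (xs : List Int) (x : Int) : famP (xs ++ [x]) ((xs.length : Int) + 1) = none := by
  unfold famP
  rw [len_snoc, PySem.List.pyRange_one_eq_nil (le_refl _)]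
  rfl

theorem famM2_nil_top (xs : List Int) (x : Int) : famM2 (xs ++ [x]) ((xs.length : Int) + 1) = none := by
  unfold famM2
  rw [len_snoc, PySem.List.pyRange_one_eq_nil (le_refl _)]
  rfl

theorem famQ_snoc (xs : List Int) (x a : Int) (h0 : 0 ≤ a) (ha : a ≤ (xs.length : Int)) :
    famQ (xs ++ [x]) a = pvOmax (famQ xs a) (pvShift (-x) (famM2 xs a)) := by
  unfold famQ
  rw [len_snoc, pvBig_map_range_succ a _ ha, famP_nil_top, pvShift_none, pvOmax_none_right]
  have hold : ∀ j ∈ PySem.List.pyRange a (xs.length : Int) 1,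
      pvShift (-(PySem.List.pyGetD (xs ++ [x]) j 0)) (famP (xs ++ [x]) (j + 1))
        = pvOmax (pvShift (-(PySem.List.pyGetD xs j 0)) (famP xs (j + 1)))
                 (pvShift (-x) (pvShift (-(PySem.List.pyGetD xs j 0)) (famM1 xs (j + 1)))) := by
    intro j hj
    rw [PySem.List.mem_pyRange_one] at hj
    rw [getD_append_lt xs x j (by omega) hj.2,
      famP_snoc xs x (j + 1) (by omega) (by omega), pvShift_omax, pvShift_comm]
  rw [List.map_congr_left hold, pvBig_map_omax]
  congr 1
  exact pvBig_map_shift (PySem.List.pyRange a (xs.length : Int) 1) (-x)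
      (fun j => pvShift (-(PySem.List.pyGetD xs j 0)) (famM1 xs (j + 1)))

theorem famM3_snoc (xs : List Int) (x a : Int) (h0 : 0 ≤ a) (ha : a ≤ (xs.length : Int)) :
    famM3 (xs ++ [x]) a = pvOmax (famM3 xs a) (pvShift x (famP xs a)) := by
  unfold famM3
  rw [len_snoc, pvBig_map_range_succ a _ ha, famM2_nil_top, pvShift_none, pvOmax_none_right]
  have hold : ∀ i ∈ PySem.List.pyRange a (xs.length : Int) 1,
      pvShift (PySem.List.pyGetD (xs ++ [x]) i 0) (famM2 (xs ++ [x]) (i + 1))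
        = pvOmax (pvShift (PySem.List.pyGetD xs i 0) (famM2 xs (i + 1)))
                 (pvShift x (pvShift (PySem.List.pyGetD xs i 0) (famN xs (i + 1)))) := by
    intro i hi
    rw [PySem.List.mem_pyRange_one] at hi
    rw [getD_append_lt xs x i (by omega) hi.2,
      famM2_snoc xs x (i + 1) (by omega) (by omega), pvShift_omax, pvShift_comm]
  rw [List.map_congr_left hold, pvBig_map_omax]
  congr 1
  exact pvBig_map_shift (PySem.List.pyRange a (xs.length : Int) 1) x
      (fun i => pvShift (PySem.List.pyGetD xs i 0) (famN xs (i + 1)))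

theorem famR_snoc (xs : List Int) (x a : Int) (h0 : 0 ≤ a) (ha : a ≤ (xs.length : Int)) :
    famR (xs ++ [x]) a = pvOmax (famR xs a) (pvShift (-x) (famM3 xs a)) := by
  unfold famR
  have hQtop : famQ (xs ++ [x]) ((xs.length : Int) + 1) = none := by
    unfold famQ
    rw [len_snoc, PySem.List.pyRange_one_eq_nil (le_refl _)]
    rfl
  rw [len_snoc, pvBig_map_range_succ a _ ha, hQtop, pvShift_none, pvOmax_none_right]
  have hold : ∀ i ∈ PySem.List.pyRange a (xs.length : Int) 1,
      pvShift (PySem.List.pyGetD (xs ++ [x]) i 0) (famQ (xs ++ [x]) (i + 1))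
        = pvOmax (pvShift (PySem.List.pyGetD xs i 0) (famQ xs (i + 1)))
                 (pvShift (-x) (pvShift (PySem.List.pyGetD xs i 0) (famM2 xs (i + 1)))) := by
    intro i hi
    rw [PySem.List.mem_pyRange_one] at hi
    rw [getD_append_lt xs x i (by omega) hi.2,
      famQ_snoc xs x (i + 1) (by omega) (by omega), pvShift_omax, pvShift_comm]
  rw [List.map_congr_left hold, pvBig_map_omax]
  congr 1
  exact pvBig_map_shift (PySem.List.pyRange a (xs.length : Int) 1) (-x)
      (fun i => pvShift (PySem.List.pyGetD xs i 0) (famM2 xs (i + 1)))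

theorem map_sub_eq_shift (x : Int) (o : Option Int) : o.map (fun v => v - x) = pvShift (-x) o := by
  cases o <;> simp [pvShift] <;> ring
theorem map_add_eq_shift (x : Int) (o : Option Int) : o.map (fun v => v + x) = pvShift x o := by
  cases o <;> simp [pvShift] <;> ring

theorem fam_nil_zero :
    famM1 [] 0 = none ∧ famP [] 0 = none ∧ famM3 [] 0 = none ∧ famR [] 0 = none := by
  refine ⟨?_, ?_, ?_, ?_⟩ <;>
    simp [famM1, famP, famM3, famR, PySem.List.pyRange_one_eq_nil, pvBig]

theorem foldB (xs : List Int) :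
    xs.foldl pvStep (none, none, none, none) = (famM1 xs 0, famP xs 0, famM3 xs 0, famR xs 0) := by
  induction xs using List.reverseRecOn with
  | nil =>
      obtain ⟨h1, h2, h3, h4⟩ := fam_nil_zero
      simp [h1, h2, h3, h4]
  | append_singleton xs x ih =>
      have h0 : (0 : Int) ≤ (xs.length : Int) := by positivity
      rw [List.foldl_append, List.foldl_cons, List.foldl_nil, ih]
      simp only [pvStep]
      rw [map_sub_eq_shift x (famM1 xs 0), map_add_eq_shift x (famP xs 0),
        map_sub_eq_shift x (famM3 xs 0)]
      rw [famM1_snoc xs x 0 (le_refl _) h0, famP_snoc xs x 0 (le_refl _) h0,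
        famM3_snoc xs x 0 (le_refl _) h0, famR_snoc xs x 0 (le_refl _) h0]

-- ===== VERDICT (by name: the statement is the Claim_ definition above) =====
theorem maximizeExpression_spec : Claim_equal_maximizeExpression := by
  intro array _
  unfold Spec_maximizeExpression maximizeExpression maximizeExpression_alt
  by_cases h : array.length < 4
  · simp [h]
  · simp only [h, if_false]
    rw [loopA_eq, foldB]
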